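-- pv_equiv track=rewrite | github.com/MrBrantCode/unitest_baseline | mut_generate/mist_train_taco/taco_18666/solution.py | can_petya_reach_last_stair
-- ===== SOURCE A (Python) =====
-- def can_petya_reach_last_stair(n, m, dirty_stairs):
--     if m == 0:
--         return 'YES'
--
--     dirty_set = set(dirty_stairs)
--
--     # Check if the first or last stair is dirty
--     if 1 in dirty_set or n in dirty_set:
--         return 'NO'
--
--     # Check for consecutive dirty stairs
--     for stair in dirty_set:
--         if stair + 1 in dirty_set and stair + 2 in dirty_set:
--             return 'NO'
--
--     return 'YES'
-- ===== SOURCE B (Python) =====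
-- def can_petya_reach_last_stair(n, m, dirty_stairs):
--     if m == 0:
--         return 'YES'
--     p2 = None
--     p1 = None
--     for v in sorted(set(dirty_stairs)):
--         if v == 1 or v == n:
--             return 'NO'
--         if p2 is not None and p1 == p2 + 1 and v == p1 + 1:
--             return 'NO'
--         p2, p1 = p1, v
--     return 'YES'
-- ===== Notes on version B (the rewrite author's own statement) =====
-- stated objective: alternative
-- what changed: Replaces A's hash-set +1/+2 membership probes over the set with a single sorted sweep that keeps the last two visited stairs and reports NO when three consecutive sorted values form a step-1 run (endpoint checks folded into the same pass).
import Mathlib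
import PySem

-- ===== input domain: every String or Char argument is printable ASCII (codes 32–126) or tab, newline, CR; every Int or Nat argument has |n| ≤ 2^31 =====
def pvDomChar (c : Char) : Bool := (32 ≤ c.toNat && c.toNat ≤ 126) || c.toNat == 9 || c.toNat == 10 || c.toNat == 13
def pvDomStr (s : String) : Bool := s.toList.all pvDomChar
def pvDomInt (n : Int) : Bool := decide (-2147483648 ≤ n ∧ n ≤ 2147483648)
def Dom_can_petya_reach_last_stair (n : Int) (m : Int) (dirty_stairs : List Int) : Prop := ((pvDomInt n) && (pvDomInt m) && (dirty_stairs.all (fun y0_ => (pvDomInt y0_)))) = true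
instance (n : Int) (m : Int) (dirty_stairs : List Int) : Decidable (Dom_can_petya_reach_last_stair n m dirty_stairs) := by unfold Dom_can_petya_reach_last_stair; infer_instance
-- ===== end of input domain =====

-- B replaces A's hash-set +1/+2 membership probes with one sorted sweep keeping the
-- last two visited stairs (alternative decomposition; not claimed faster).

-- ===== PORT A =====
-- 'for stair in dirty_set: if stair+1 in dirty_set and stair+2 in dirty_set: return NO'
-- (iterating the set is order-independent here: the loop only decides an existence)
def pvALoop (ds : PySem.Set Int) : List Int → String
  | [] => "YES"
  | s :: rest =>
    if PySem.Set.contains ds (s + 1) && PySem.Set.contains ds (s + 2) then "NO"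
    else pvALoop ds rest

def can_petya_reach_last_stair (n : Int) (m : Int) (dirty_stairs : List Int) : String :=
  if m == 0 then "YES"
  else
    let dirty_set : PySem.Set Int := PySem.Set.ofList dirty_stairs
    if PySem.Set.contains dirty_set 1 || PySem.Set.contains dirty_set n then "NO"
    else pvALoop dirty_set dirty_set

-- ===== PORT B =====
-- loop body of Source B: v==1 or v==n check, then the last-two-consecutive check, then shift (p2,p1)
def pvBLoop (n : Int) (p2 p1 : Option Int) : List Int → String
  | [] => "YES"
  | v :: rest =>
    if v == 1 || v == n then "NO"
    else if (match p2, p1 with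
             | some a, some b => b == a + 1 && v == b + 1
             | _, _ => false) then "NO"
    else pvBLoop n p1 (some v) rest

def can_petya_reach_last_stair_alt (n : Int) (m : Int) (dirty_stairs : List Int) : String :=
  if m == 0 then "YES"
  else pvBLoop n none none (PySem.List.sorted (PySem.Set.ofList dirty_stairs) (fun x => x) false)

-- ===== PRECONDITION & SPEC =====
def Spec_can_petya_reach_last_stair (n : Int) (m : Int) (dirty_stairs : List Int) (out : String) : Prop := out = can_petya_reach_last_stair_alt n m dirty_stairs
instance (n : Int) (m : Int) (dirty_stairs : List Int) (out : String) : Decidable (Spec_can_petya_reach_last_stair n m dirty_stairs out) := by unfold Spec_can_petya_reach_last_stair; infer_instance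

-- ===== CLAIM (what is proved, stated in full; the proofs are below) =====
def Claim_equal_can_petya_reach_last_stair : Prop := ∀ (n : Int) (m : Int) (dirty_stairs : List Int), Dom_can_petya_reach_last_stair n m dirty_stairs → Spec_can_petya_reach_last_stair n m dirty_stairs (can_petya_reach_last_stair n m dirty_stairs)

-- ===== LEMMAS AND PROOFS =====

lemma pvIfNo (p q : Prop) [Decidable p] [Decidable q] :
    (if p then "NO" else if q then "NO" else "YES") = (if p ∨ q then "NO" else "YES") := by
  split_ifs <;> tauto

lemma pvIfIff (p q : Prop) [Decidable p] [Decidable q] (h : p ↔ q) :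
    (if p then "NO" else "YES") = (if q then "NO" else "YES") := by
  split_ifs <;> tauto

-- 'the list contains three consecutive elements a, a+1, a+2 in a row'
def pvTrip3 : List Int → Bool
  | a :: b :: c :: t => (b == a + 1 && c == b + 1) || pvTrip3 (b :: c :: t)
  | _ => false

lemma pvALoop_eq (ds : PySem.Set Int) (elems : List Int) :
    pvALoop ds elems =
      if ∃ s ∈ elems, (s + 1) ∈ ds ∧ (s + 2) ∈ ds then "NO" else "YES" := by
  induction elems with
  | nil => simp [pvALoop]
  | cons s rest ih =>
    simp only [pvALoop, ih, PySem.Set.contains_eq_listContains, List.contains_eq_mem,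
      Bool.and_eq_true, decide_eq_true_eq, List.exists_mem_cons_iff]
    rw [pvIfNo]

lemma pvTrip3_cons (a : Int) (rest : List Int) (h : pvTrip3 rest = true) :
    pvTrip3 (a :: rest) = true := by
  match rest with
  | [] => simp [pvTrip3] at h
  | [b] => simp [pvTrip3] at h
  | b :: c :: t => simp [pvTrip3, h]

lemma pvBLoop_eq (n : Int) (p2 p1 : Option Int) (vs : List Int)
    (hs : p2.isSome → p1.isSome) :
    pvBLoop n p2 p1 vs =
      if (∃ v ∈ vs, v = 1 ∨ v = n) ∨ pvTrip3 (p2.toList ++ p1.toList ++ vs) = true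
      then "NO" else "YES" := by
  induction vs generalizing p2 p1 with
  | nil =>
    match p2, p1 with
    | none, none => simp [pvBLoop, pvTrip3]
    | none, some b => simp [pvBLoop, pvTrip3]
    | some a, some b => simp [pvBLoop, pvTrip3]
    | some a, none => simp at hs
  | cons v rest ih =>
    match p2, p1 with
    | none, none =>
      have hrec := ih none (some v) (by simp)
      simp only [pvBLoop, hrec, Option.toList_none, Option.toList_some, List.nil_append,
        List.cons_append, beq_iff_eq, Bool.or_eq_true, Bool.false_eq_true, if_false,
        List.exists_mem_cons_iff]
      rw [pvIfNo]
      exact pvIfIff _ _ (or_assoc).symm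
    | none, some b =>
      have hrec := ih (some b) (some v) (by simp)
      simp only [pvBLoop, hrec, Option.toList_none, Option.toList_some, List.nil_append,
        List.cons_append, beq_iff_eq, Bool.or_eq_true, Bool.false_eq_true, if_false,
        List.exists_mem_cons_iff]
      rw [pvIfNo]
      exact pvIfIff _ _ (or_assoc).symm
    | some a, some b =>
      have hrec := ih (some b) (some v) (by simp)
      have htr : pvTrip3 (a :: b :: v :: rest) = ((b == a + 1 && v == b + 1) || pvTrip3 (b :: v :: rest)) := by
        simp [pvTrip3]
      simp only [pvBLoop, hrec, Option.toList_some, List.nil_append,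
        List.cons_append, htr, beq_iff_eq, Bool.or_eq_true,
        Bool.and_eq_true, List.exists_mem_cons_iff]
      rw [pvIfNo, pvIfNo]
      refine pvIfIff _ _ ?_
      generalize (∃ v ∈ rest, v = 1 ∨ v = n) = Q
      tauto
    | some a, none => simp at hs

-- in a strictly increasing list, a consecutive-in-a-row triple is the same as a +1/+2 triple of members
lemma pvTrip3_iff (T : List Int) (hp : T.Pairwise (· < ·)) :
    pvTrip3 T = true ↔ ∃ s ∈ T, (s + 1) ∈ T ∧ (s + 2) ∈ T := by
  induction T with
  | nil => simp [pvTrip3]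
  | cons a rest ih =>
    have hlt : ∀ y ∈ rest, a < y := fun y hy => (List.pairwise_cons.mp hp).1 y hy
    have hpr : rest.Pairwise (· < ·) := (List.pairwise_cons.mp hp).2
    constructor
    · intro h
      match rest, h with
      | b :: c :: t, h =>
        simp only [pvTrip3, Bool.or_eq_true, Bool.and_eq_true, beq_iff_eq] at h
        rcases h with ⟨hb, hc⟩ | h
        · exact ⟨a, by simp, by simp [hb], by simp [hb, hc]; omega⟩
        · have ⟨s, hs, h1, h2⟩ := (ih hpr).mp h
          exact ⟨s, by simp_all, by simp_all, by simp_all⟩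
    · rintro ⟨s, hs, h1, h2⟩
      rcases List.mem_cons.mp hs with rfl | hs
      · -- s = a : the next two list elements must be a+1 and a+2
        have h1' : s + 1 ∈ rest := by
          rcases List.mem_cons.mp h1 with h | h
          · omega
          · exact h
        have h2' : s + 2 ∈ rest := by
          rcases List.mem_cons.mp h2 with h | h
          · omega
          · exact h
        match rest, h1', h2' with
        | b :: t, h1', h2' =>
          have hab : s < b := hlt b (by simp)
          have hb : b = s + 1 := by
            rcases List.mem_cons.mp h1' with h | h
            · omega
            · have := (List.pairwise_cons.mp hpr).1 _ h; omega
          have h2t : s + 2 ∈ t := by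
            rcases List.mem_cons.mp h2' with h | h
            · omega
            · exact h
          match t, h2t with
          | c :: t', h2t =>
            have hbc : b < c := (List.pairwise_cons.mp hpr).1 c (by simp)
            have hc : c = s + 2 := by
              rcases List.mem_cons.mp h2t with h | h
              · omega
              · have := (List.pairwise_cons.mp ((List.pairwise_cons.mp hpr).2)).1 _ h; omega
            subst hb; subst hc
            have he : pvTrip3 (s :: (s + 1) :: (s + 2) :: t')
                = ((s + 1 == s + 1 && s + 2 == s + 1 + 1) || pvTrip3 ((s + 1) :: (s + 2) :: t')) := by
              simp [pvTrip3]
            rw [he]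
            simp only [Bool.or_eq_true, Bool.and_eq_true, beq_iff_eq]
            refine Or.inl ⟨?_, ?_⟩ <;> first | omega | trivial
      · -- s in the tail: all three are in the tail
        have h1' : s + 1 ∈ rest := by
          rcases List.mem_cons.mp h1 with h | h
          · have := hlt s hs; omega
          · exact h
        have h2' : s + 2 ∈ rest := by
          rcases List.mem_cons.mp h2 with h | h
          · have := hlt s hs; omega
          · exact h
        exact pvTrip3_cons a rest ((ih hpr).mpr ⟨s, hs, h1', h2'⟩)

-- ===== VERDICT (by name: the statement is the Claim_ definition above) =====
theorem can_petya_reach_last_stair_spec : Claim_equal_can_petya_reach_last_stair := by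
  intro n m ds _
  unfold Spec_can_petya_reach_last_stair can_petya_reach_last_stair can_petya_reach_last_stair_alt
  by_cases hm : m == 0
  · simp [hm]
  · simp only [hm, if_false, Bool.false_eq_true]
    set S : PySem.Set Int := PySem.Set.ofList ds with hS
    set T : List Int := PySem.List.sorted S (fun x => x) false with hT
    have hmemT : ∀ x : Int, x ∈ T ↔ x ∈ S := fun x => PySem.List.mem_sorted S (fun x => x) false x
    have hTlt : T.Pairwise (· < ·) := PySem.List.sorted_ofList_pairwise_lt ds
    rw [pvALoop_eq, pvBLoop_eq n none none T (by simp)]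
    simp only [Option.toList_none, List.nil_append]
    have hA : ((PySem.Set.contains S 1 || PySem.Set.contains S n) = true) ↔ ((1 : Int) ∈ S ∨ n ∈ S) := by
      simp [PySem.Set.contains_eq_listContains]
    have hB : ((∃ v ∈ T, v = 1 ∨ v = n) ∨ pvTrip3 T = true) ↔
        (((1 : Int) ∈ S ∨ n ∈ S) ∨ ∃ s ∈ S, (s + 1) ∈ S ∧ (s + 2) ∈ S) := by
      rw [pvTrip3_iff T hTlt]
      constructor
      · rintro (⟨v, hv, rfl | rfl⟩ | ⟨s, h0, h1, h2⟩)
        · exact Or.inl (Or.inl ((hmemT _).mp hv))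
        · exact Or.inl (Or.inr ((hmemT _).mp hv))
        · exact Or.inr ⟨s, (hmemT _).mp h0, (hmemT _).mp h1, (hmemT _).mp h2⟩
      · rintro ((h | h) | ⟨s, h0, h1, h2⟩)
        · exact Or.inl ⟨1, (hmemT _).mpr h, Or.inl rfl⟩
        · exact Or.inl ⟨n, (hmemT _).mpr h, Or.inr rfl⟩
        · exact Or.inr ⟨s, (hmemT _).mpr h0, (hmemT _).mpr h1, (hmemT _).mpr h2⟩
    by_cases h1 : ((1 : Int) ∈ S ∨ n ∈ S)
    · rw [if_pos (hA.mpr h1), if_pos (hB.mpr (Or.inl h1))]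
    · rw [if_neg (fun hc => h1 (hA.mp hc))]
      by_cases h2 : ∃ s ∈ S, (s + 1) ∈ S ∧ (s + 2) ∈ S
      · rw [if_pos h2, if_pos (hB.mpr (Or.inr h2))]
      · rw [if_neg h2, if_neg (fun hc => ((hB.mp hc).elim h1 h2))]
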